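-- pv_equiv track=rewrite | github.com/WillDenby/willc | willc/main.py | c_m_overruler
-- ===== SOURCE A (Python) =====
-- def c_m_overruler(cli_args: list, c: bool, m: bool) -> tuple:
--     """If c and m are both true, return only the last one used in `cli_args` as true"
--
--     As in the original `wc` utility, -c and -m cancel out any prior usage of the other.
--
--     Args:
--         cli_args: Streamed in from caller in main.
--         c: The option to count bytes.
--         m: The option to count multibytes.
--
--     Returns:
--         Updated boolean values for c and m, for unpacking in main"""
--
--     flattened_opts = []
--     for arg in cli_args:
--         if arg.startswith("-") and len(arg) > 1 and not arg.startswith("--"):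
--             flattened_opts.extend(f"-{char}" for char in arg[1:])
--         else:
--             flattened_opts.append(arg)
--     m_last_index = max(
--         (i for i, arg in enumerate(flattened_opts) if arg in ["-m", "--multibytes"]),
--         default=-1,
--     )
--     c_last_index = max(
--         (i for i, arg in enumerate(flattened_opts) if arg in ["-c", "--bytes"]),
--         default=-1,
--     )
--     c = c_last_index > m_last_index
--     m = m_last_index > c_last_index
--     return c, m
-- ===== SOURCE B (Python) =====
-- def c_m_overruler(cli_args: list, c: bool, m: bool) -> tuple:
--     """Single stateful left-to-right scan: track only the last-used flag."""
--     last = None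
--     for arg in cli_args:
--         if arg.startswith("-") and len(arg) > 1 and not arg.startswith("--"):
--             toks = ["-" + ch for ch in arg[1:]]
--         else:
--             toks = [arg]
--         for t in toks:
--             if t in ("-c", "--bytes"):
--                 last = "c"
--             elif t in ("-m", "--multibytes"):
--                 last = "m"
--     return (last == "c", last == "m")
-- ===== Notes on version B (the rewrite author's own statement) =====
-- stated objective: simpler
-- what changed: Replaces the flatten-then-two-max-index-scans-and-compare structure with a single left-to-right pass that keeps one 'last flag seen' variable, so the result is read off the final state.
import Mathlib
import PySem

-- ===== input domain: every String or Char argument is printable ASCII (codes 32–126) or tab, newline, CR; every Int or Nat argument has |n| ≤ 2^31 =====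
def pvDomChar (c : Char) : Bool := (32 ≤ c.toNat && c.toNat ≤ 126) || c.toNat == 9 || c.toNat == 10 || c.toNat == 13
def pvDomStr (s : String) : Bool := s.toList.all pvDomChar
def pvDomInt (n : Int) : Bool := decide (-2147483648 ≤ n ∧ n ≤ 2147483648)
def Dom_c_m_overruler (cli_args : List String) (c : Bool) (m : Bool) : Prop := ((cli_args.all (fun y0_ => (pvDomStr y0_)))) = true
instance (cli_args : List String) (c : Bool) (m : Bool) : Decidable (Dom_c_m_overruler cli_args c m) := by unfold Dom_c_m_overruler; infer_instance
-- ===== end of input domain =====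

-- B replaces A's flatten + two max-last-index scans + index comparison by a single
-- stateful left-to-right pass tracking only the last-used flag (objective: simpler).

-- ===== PORT A =====
def c_m_overruler (cli_args : List String) (c : Bool) (m : Bool) : Bool × Bool :=
  let flattened_opts := cli_args.foldl (fun acc arg =>
    if PySem.Str.startswith arg "-" && decide (1 < PySem.Str.len arg) && !PySem.Str.startswith arg "--" then
      acc ++ ((PySem.Str.slice arg (some 1) none).toList.map (fun ch => String.ofList ['-', ch]))
    else acc ++ [arg]) []
  -- max(generator, default=-1) over matching enumerate indices = PySem.List.maxD
  let m_last_index := PySem.List.maxD (((PySem.List.enumerate flattened_opts).filter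
      (fun p => ["-m", "--multibytes"].contains p.2)).map (fun p => p.1)) id (-1)
  let c_last_index := PySem.List.maxD (((PySem.List.enumerate flattened_opts).filter
      (fun p => ["-c", "--bytes"].contains p.2)).map (fun p => p.1)) id (-1)
  (decide (m_last_index < c_last_index), decide (c_last_index < m_last_index))

-- ===== PORT B =====
-- per-token state update: record the last-used flag
def pvStep (last : Option String) (t : String) : Option String :=
  if t == "-c" || t == "--bytes" then some "c"
  else if t == "-m" || t == "--multibytes" then some "m"
  else last

def c_m_overruler_alt (cli_args : List String) (c : Bool) (m : Bool) : Bool × Bool :=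
  let last := cli_args.foldl (fun last arg =>
    let toks := if PySem.Str.startswith arg "-" && decide (1 < PySem.Str.len arg) && !PySem.Str.startswith arg "--" then
        (PySem.Str.slice arg (some 1) none).toList.map (fun ch => String.ofList ['-', ch])
      else [arg]
    toks.foldl pvStep last) none
  (last == some "c", last == some "m")

-- ===== PRECONDITION & SPEC =====
def Spec_c_m_overruler (cli_args : List String) (c : Bool) (m : Bool) (out : Bool × Bool) : Prop := out = c_m_overruler_alt cli_args c m
instance (cli_args : List String) (c : Bool) (m : Bool) (out : Bool × Bool) : Decidable (Spec_c_m_overruler cli_args c m out) := by unfold Spec_c_m_overruler; infer_instance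

-- ===== CLAIM (what is proved, stated in full; the proofs are below) =====
def Claim_equal_c_m_overruler : Prop := ∀ (cli_args : List String) (c : Bool) (m : Bool), Dom_c_m_overruler cli_args c m → Spec_c_m_overruler cli_args c m (c_m_overruler cli_args c m)

-- ===== LEMMAS AND PROOFS =====

-- proof-side abbreviations
def pvToks (arg : String) : List String :=
  if PySem.Str.startswith arg "-" && decide (1 < PySem.Str.len arg) && !PySem.Str.startswith arg "--" then
    (PySem.Str.slice arg (some 1) none).toList.map (fun ch => String.ofList ['-', ch])
  else [arg]

def pvCPred (t : String) : Bool := ["-c", "--bytes"].contains t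
def pvMPred (t : String) : Bool := ["-m", "--multibytes"].contains t

def pvIdx (p : String → Bool) (l : List String) : Int :=
  PySem.List.maxD (((PySem.List.enumerate l).filter (fun q => p q.2)).map (fun q => q.1)) id (-1)

-- A's flattening loop is flatMap of the per-argument token list
lemma flatten_eq_flatMap (cli_args : List String) :
    cli_args.foldl (fun acc arg =>
      if PySem.Str.startswith arg "-" && decide (1 < PySem.Str.len arg) && !PySem.Str.startswith arg "--" then
        acc ++ ((PySem.Str.slice arg (some 1) none).toList.map (fun ch => String.ofList ['-', ch]))
      else acc ++ [arg]) [] = cli_args.flatMap pvToks := by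
  have h : (fun (acc : List String) arg =>
      if PySem.Str.startswith arg "-" && decide (1 < PySem.Str.len arg) && !PySem.Str.startswith arg "--" then
        acc ++ ((PySem.Str.slice arg (some 1) none).toList.map (fun ch => String.ofList ['-', ch]))
      else acc ++ [arg]) = (fun acc arg => acc ++ pvToks arg) := by
    funext acc arg
    unfold pvToks
    split <;> rfl
  rw [h, PySem.List.foldl_append_eq_flatMap]
  rfl

-- B's nested loop is the token-level scan over the flattened list
lemma alt_fold_eq (cli_args : List String) :
    cli_args.foldl (fun last arg =>
      let toks := if PySem.Str.startswith arg "-" && decide (1 < PySem.Str.len arg) && !PySem.Str.startswith arg "--" then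
        (PySem.Str.slice arg (some 1) none).toList.map (fun ch => String.ofList ['-', ch])
      else [arg]
      toks.foldl pvStep last) none = (cli_args.flatMap pvToks).foldl pvStep none := by
  rw [List.foldl_flatMap]
  rfl

-- pvStep phrased through the two membership predicates
lemma pvStep_eq (s : Option String) (t : String) :
    pvStep s t = if pvCPred t then some "c" else if pvMPred t then some "m" else s := by
  unfold pvStep pvCPred pvMPred
  cases h1 : (t == "-c") <;> cases h2 : (t == "--bytes") <;>
    cases h3 : (t == "-m") <;> cases h4 : (t == "--multibytes") <;>
    simp [List.contains, List.elem, h1, h2, h3, h4]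

-- the two membership predicates, spelled as boolean equality tests
lemma pvCPred_eq (t : String) : pvCPred t = ((t == "-c") || (t == "--bytes")) := by
  cases h1 : (t == "-c") <;> cases h2 : (t == "--bytes") <;>
    simp [pvCPred, List.contains, List.elem, h1, h2]

-- the two predicates never both hold
lemma preds_disjoint (t : String) (hc : pvCPred t = true) : pvMPred t = false := by
  rw [pvCPred_eq] at hc
  have : t = "-c" ∨ t = "--bytes" := by
    rcases Bool.or_eq_true_iff.mp hc with h | h
    · exact Or.inl (eq_of_beq h)
    · exact Or.inr (eq_of_beq h)
  rcases this with rfl | rfl <;> decide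

lemma enumerate_append_singleton (l : List String) (x : String) : ∀ s : Int,
    PySem.List.enumerate (l ++ [x]) s = PySem.List.enumerate l s ++ [((s + l.length : Int), x)] := by
  induction l with
  | nil =>
      intro s
      simp [PySem.List.enumerate_cons, PySem.List.enumerate_nil]
  | cons y ys ih =>
      intro s
      simp only [List.cons_append, PySem.List.enumerate_cons, ih (s + 1), List.length_cons]
      have : s + 1 + (ys.length : Int) = s + ((ys.length : Int) + 1) := by ring
      rw [this]
      push_cast
      ring_nf

-- max? with id over a list capped by a new strict maximum appended at the end
lemma max?_id_snoc (ys : List Int) (j : Int) (h : ∀ y ∈ ys, y < j) :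
    PySem.List.max? (ys ++ [j]) id = some j := by
  cases hy : PySem.List.max? ys id with
  | none =>
      have : ys = [] := (PySem.List.max?_eq_none_iff ys id).mp hy
      subst this
      simp [PySem.List.max?]
  | some m =>
      have hm : m < j := h m (PySem.List.max?_mem hy)
      unfold PySem.List.max? at hy ⊢
      rw [List.foldl_append, hy]
      simp [hm]

-- every index produced by enumerate-filter-map is < length
lemma mem_idxs_lt (p : String → Bool) (l : List String) (y : Int)
    (hy : y ∈ ((PySem.List.enumerate l).filter (fun q => p q.2)).map (fun q => q.1)) :
    y < (l.length : Int) := by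
  rcases List.mem_map.mp hy with ⟨q, hq, rfl⟩
  have hq' : q ∈ PySem.List.enumerate l := List.mem_of_mem_filter hq
  have : q.1 ∈ (PySem.List.enumerate l).map (fun q => q.1) := List.mem_map_of_mem hq'
  rw [PySem.List.map_fst_enumerate] at this
  have := (PySem.List.mem_pyRange_one).mp this
  omega

lemma idx_lt (p : String → Bool) (l : List String) : pvIdx p l < (l.length : Int) := by
  unfold pvIdx PySem.List.maxD
  cases hfold : PySem.List.max? (((PySem.List.enumerate l).filter (fun q => p q.2)).map (fun q => q.1)) id with
  | none =>
      simp only [Option.getD_none]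
      omega
  | some m =>
      simp only [Option.getD_some]
      exact mem_idxs_lt p l m (PySem.List.max?_mem hfold)

lemma idx_append_pos (p : String → Bool) (l : List String) (x : String) (hx : p x = true) :
    pvIdx p (l ++ [x]) = (l.length : Int) := by
  unfold pvIdx PySem.List.maxD
  rw [enumerate_append_singleton l x 0, List.filter_append, List.map_append]
  simp only [zero_add, List.filter_cons, hx, if_pos, List.filter_nil, List.map_cons, List.map_nil]
  rw [max?_id_snoc _ _ (fun y hy => mem_idxs_lt p l y hy)]
  rfl

lemma idx_append_neg (p : String → Bool) (l : List String) (x : String) (hx : p x = false) :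
    pvIdx p (l ++ [x]) = pvIdx p l := by
  unfold pvIdx
  rw [enumerate_append_singleton l x 0, List.filter_append]
  simp [hx]

-- main invariant: the scan state mirrors the comparison of the two last indices
lemma main_inv (l : List String) :
    (l.foldl pvStep none = some "c" ↔ pvIdx pvMPred l < pvIdx pvCPred l) ∧
    (l.foldl pvStep none = some "m" ↔ pvIdx pvCPred l < pvIdx pvMPred l) := by
  induction l using List.reverseRecOn with
  | nil =>
      constructor <;> simp [pvIdx, PySem.List.enumerate_nil, PySem.List.maxD, PySem.List.max?]
  | append_singleton l x ih =>
      rw [List.foldl_append, List.foldl_cons, List.foldl_nil, pvStep_eq]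
      by_cases hc : pvCPred x = true
      · have hm : pvMPred x = false := preds_disjoint x hc
        rw [idx_append_pos pvCPred l x hc, idx_append_neg pvMPred l x hm]
        have hlt := idx_lt pvMPred l
        simp only [hc, if_true]
        constructor
        · simp [hlt]
        · constructor
          · intro h
            exact absurd h (by simp)
          · intro h
            omega
      · have hc' : pvCPred x = false := by simpa using hc
        by_cases hm : pvMPred x = true
        · rw [idx_append_pos pvMPred l x hm, idx_append_neg pvCPred l x hc']
          have hlt := idx_lt pvCPred l
          simp only [hc', hm, Bool.false_eq_true, if_false, if_true]
          constructor
          · constructor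
            · intro h
              exact absurd h (by simp)
            · intro h
              omega
          · simp [hlt]
        · have hm' : pvMPred x = false := by simpa using hm
          rw [idx_append_neg pvCPred l x hc', idx_append_neg pvMPred l x hm']
          simp only [hc', hm', Bool.false_eq_true, if_false]
          exact ih

-- ===== VERDICT (by name: the statement is the Claim_ definition above) =====
theorem c_m_overruler_spec : Claim_equal_c_m_overruler := by
  intro cli_args c m _
  unfold Spec_c_m_overruler c_m_overruler c_m_overruler_alt
  rw [flatten_eq_flatMap, alt_fold_eq]
  dsimp only
  obtain ⟨h1, h2⟩ := main_inv (cli_args.flatMap pvToks)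
  have ec : pvIdx pvCPred (cli_args.flatMap pvToks) =
      PySem.List.maxD (((PySem.List.enumerate (cli_args.flatMap pvToks)).filter
        (fun p => ["-c", "--bytes"].contains p.2)).map (fun p => p.1)) id (-1) := rfl
  have em : pvIdx pvMPred (cli_args.flatMap pvToks) =
      PySem.List.maxD (((PySem.List.enumerate (cli_args.flatMap pvToks)).filter
        (fun p => ["-m", "--multibytes"].contains p.2)).map (fun p => p.1)) id (-1) := rfl
  rw [← ec, ← em]
  refine Prod.ext ?_ ?_
  · show decide (pvIdx pvMPred _ < pvIdx pvCPred _) = (_ == some "c")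
    rw [show ((List.foldl pvStep none (cli_args.flatMap pvToks)) == some "c") =
        decide (List.foldl pvStep none (cli_args.flatMap pvToks) = some "c") by exact Bool.beq_eq_decide_eq _ _]
    exact decide_eq_decide.mpr h1.symm
  · show decide (pvIdx pvCPred _ < pvIdx pvMPred _) = (_ == some "m")
    rw [show ((List.foldl pvStep none (cli_args.flatMap pvToks)) == some "m") =
        decide (List.foldl pvStep none (cli_args.flatMap pvToks) = some "m") by exact Bool.beq_eq_decide_eq _ _]
    exact decide_eq_decide.mpr h2.symm
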